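-- pv_equiv track=rewrite | github.com/kort0881/sbornik-vless | subscriptions_poster.py | parse_subscriptions_blocks
-- ===== SOURCE A (Python) =====
-- def parse_subscriptions_blocks(subscriptions_text: str):
--     """
--     Формат ожидается такой (пример):
--
--     === VLESS ===
--     https://.../vless_001.txt
--     https://.../vless_002.txt
--
--     === VMESS ===
--     https://.../vmess_001.txt
--     ...
--
--     Все URL берём как есть (полные, не короткие).
--     """
--     blocks = {}
--     current = None
--
--     for line in subscriptions_text.splitlines():
--         line = line.strip()
--         if not line:
--             continue
--
--         if line.startswith("===") and line.endswith("==="):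
--             name = line.strip("=").strip()
--             proto = name.split()[0].upper()
--             blocks.setdefault(proto, [])
--             current = proto
--             continue
--
--         if current is None:
--             # строки до первого блока игнорируем
--             continue
--
--         if line.startswith("http"):
--             blocks[current].append(line)
--
--     return blocks
-- ===== SOURCE B (Python) =====
-- def parse_subscriptions_blocks(subscriptions_text: str):
--     # Phase 1: normalise — stripped, non-empty lines only.
--     lines = [ln for ln in (raw.strip() for raw in subscriptions_text.splitlines()) if ln]
--
--     def is_header(ln):
--         return ln.startswith("===") and ln.endswith("===")
--
--     # Phase 2: partition into segments, each headed by a '=== ... ===' line;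
--     # content before the first header is dropped.
--     i = 0
--     while i < len(lines) and not is_header(lines[i]):
--         i += 1
--     lines = lines[i:]
--
--     segments = []
--     while lines:
--         header, rest = lines[0], lines[1:]
--         j = 0
--         while j < len(rest) and not is_header(rest[j]):
--             j += 1
--         segments.append((header, rest[:j]))
--         lines = rest[j:]
--
--     # Phase 3: fill the dict; repeated headers for the same proto merge in order.
--     blocks = {}
--     for header, seg in segments:
--         proto = header.strip("=").strip().split()[0].upper()
--         blocks[proto] = blocks.get(proto, []) + [u for u in seg if u.startswith("http")]
--     return blocks
-- ===== Notes on version B (the rewrite author's own statement) =====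
-- stated objective: alternative
-- what changed: Replaces A's single stateful pass (a mutable 'current' block cursor consulted line by line) with a three-phase group-then-fill: normalise the lines, partition them into header-led segments dropping content before the first header, then fill the dict one whole segment at a time.
import Mathlib
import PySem

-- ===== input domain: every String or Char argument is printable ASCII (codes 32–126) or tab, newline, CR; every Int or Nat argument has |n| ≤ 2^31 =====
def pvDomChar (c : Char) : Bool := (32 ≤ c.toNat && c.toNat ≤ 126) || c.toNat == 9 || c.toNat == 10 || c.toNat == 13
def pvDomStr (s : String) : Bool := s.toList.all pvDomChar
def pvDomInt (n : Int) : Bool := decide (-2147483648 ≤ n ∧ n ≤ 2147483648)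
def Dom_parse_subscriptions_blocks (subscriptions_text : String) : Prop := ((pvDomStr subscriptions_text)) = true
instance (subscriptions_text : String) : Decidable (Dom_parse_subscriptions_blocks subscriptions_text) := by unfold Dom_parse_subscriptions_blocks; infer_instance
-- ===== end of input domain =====

-- B re-implements A's single stateful line scan as a three-phase group-then-fill (normalise lines,
-- partition into header-led segments, fill the dict per segment); same cost, different decomposition.

-- ===== PORT A =====
-- shared tiny helpers (both Pythons compute these exact expressions)
def pvIsHeader (l : List Char) : Bool :=
  PySem.Chars.startswith l "===".toList && PySem.Chars.endswith l "===".toList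

-- line.strip("=").strip().split()[0].upper(); headD [] is reached only where Python raises IndexError (outside Pre_)
def pvProto (l : List Char) : String :=
  String.ofList (PySem.Chars.upper ((PySem.Chars.split₀ (PySem.Chars.strip (PySem.Chars.stripChars l ['=']))).headD []))

-- body of A's loop after the 'if not line: continue' check
def pvACore (st : PySem.Dict String (List String) × Option String) (line : List Char) :
    PySem.Dict String (List String) × Option String :=
  if pvIsHeader line then
    let proto := pvProto line
    (st.1.setdefault proto [], some proto)
  else
    match st.2 with
    | none => st
    | some cur =>
      if PySem.Chars.startswith line "http".toList then
        (st.1.modify cur [] (fun us => us ++ [String.ofList line]), st.2)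
      else st

def pvAStep (st : PySem.Dict String (List String) × Option String) (raw : String) :
    PySem.Dict String (List String) × Option String :=
  let line := PySem.Chars.strip raw.toList
  if line = [] then st else pvACore st line

def parse_subscriptions_blocks (subscriptions_text : String) : List (String × List String) :=
  (((PySem.Str.splitlines subscriptions_text).foldl pvAStep (PySem.Dict.empty, none)).1).items

-- ===== PORT B =====
-- phase 1: stripped non-empty lines
def pvBLines (s : String) : List (List Char) :=
  ((PySem.Str.splitlines s).map (fun raw => PySem.Chars.strip raw.toList)).filter
    (fun l => !l.isEmpty)

-- phase 2: partition a header-headed line list into (header, body) segments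
def pvBSegs : List (List Char) → List (List Char × List (List Char))
  | [] => []
  | h :: tl =>
    (h, tl.takeWhile (fun l => !pvIsHeader l)) :: pvBSegs (tl.dropWhile (fun l => !pvIsHeader l))
termination_by l => l.length
decreasing_by
  simpa using Nat.lt_succ_of_le (List.length_dropWhile_le _ _)

-- phase 3: one segment into the dict
def pvBFill (d : PySem.Dict String (List String)) (seg : List Char × List (List Char)) :
    PySem.Dict String (List String) :=
  d.modify (pvProto seg.1) []
    (fun us => us ++ (seg.2.filter (fun l => PySem.Chars.startswith l "http".toList)).map String.ofList)

def parse_subscriptions_blocks_alt (subscriptions_text : String) : List (String × List String) :=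
  ((pvBSegs ((pvBLines subscriptions_text).dropWhile (fun l => !pvIsHeader l))).foldl pvBFill
    PySem.Dict.empty).items

-- ===== PRECONDITION & SPEC =====
-- Pre_ excludes exactly the inputs containing a degenerate header line (e.g. '===' or '== = =='
-- framed in '===') whose content strips to nothing: Python A raises IndexError on split()[0] there
-- (and so does B).
def Pre_parse_subscriptions_blocks (subscriptions_text : String) : Prop :=
  ∀ raw ∈ PySem.Str.splitlines subscriptions_text,
    pvIsHeader (PySem.Chars.strip raw.toList) = true →
      PySem.Chars.split₀
        (PySem.Chars.strip (PySem.Chars.stripChars (PySem.Chars.strip raw.toList) ['='])) ≠ []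
instance (subscriptions_text : String) : Decidable (Pre_parse_subscriptions_blocks subscriptions_text) := by
  unfold Pre_parse_subscriptions_blocks; infer_instance

def pvWitness_parse_subscriptions_blocks : String :=
  "=== VLESS ===\nhttps://example.com/a.txt\n\n=== vmess ===\nhttps://example.com/b.txt"

def Spec_parse_subscriptions_blocks (subscriptions_text : String) (out : List (String × List String)) : Prop := out = parse_subscriptions_blocks_alt subscriptions_text
instance (subscriptions_text : String) (out : List (String × List String)) : Decidable (Spec_parse_subscriptions_blocks subscriptions_text out) := by unfold Spec_parse_subscriptions_blocks; infer_instance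

-- ===== CLAIM (what is proved, stated in full; the proofs are below) =====
def Claim_equal_parse_subscriptions_blocks : Prop := ∀ (subscriptions_text : String), Dom_parse_subscriptions_blocks subscriptions_text → Pre_parse_subscriptions_blocks subscriptions_text → Spec_parse_subscriptions_blocks subscriptions_text (parse_subscriptions_blocks subscriptions_text)

-- ===== LEMMAS AND PROOFS =====

-- A's fold over the raw lines equals the core fold over B's normalised lines
theorem pvA_fold_norm (raws : List String) (st : PySem.Dict String (List String) × Option String) :
    raws.foldl pvAStep st =
      ((raws.map (fun raw => PySem.Chars.strip raw.toList)).filter (fun l => !l.isEmpty)).foldl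
        pvACore st := by
  induction raws generalizing st with
  | nil => rfl
  | cons r rs ih =>
    simp only [List.map_cons, List.filter_cons]
    by_cases h : PySem.Chars.strip r.toList = []
    · simp [pvAStep, h, ih]
    · simp [pvAStep, h, ih]


theorem pvDropWhileHead {α : Type} (p : α → Bool) (l : List α) (x : α) (xs : List α)
    (h : l.dropWhile p = x :: xs) : p x = false := by
  induction l with
  | nil => simp at h
  | cons a l ih =>
    rw [List.dropWhile_cons] at h
    by_cases hp : p a
    · exact ih (by simpa [hp] using h)
    · simp [hp] at h
      simp [← h.1, hp]

-- two dicts with the same nodup key list and the same lookups are equal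
theorem pvDictExt (d d' : PySem.Dict String (List String)) (hk : d.keys = d'.keys)
    (hnd : d.keys.Nodup) (hg : ∀ k, d.getD k [] = d'.getD k []) : d = d' := by
  apply PySem.Dict.ext
  rw [PySem.Dict.items_eq_map_keys d hnd [], PySem.Dict.items_eq_map_keys d' (hk ▸ hnd) [], ← hk]
  exact List.map_congr_left (fun k _ => by rw [hg k])

theorem pvKeysModify (d : PySem.Dict String (List String)) (p : String) (f : List String → List String) :
    (d.modify p [] f).keys = if d.contains p then d.keys else d.keys ++ [p] := by
  rw [PySem.Dict.keys_modify]
  by_cases hc : d.contains p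
  · rw [PySem.Dict.keys_insert_of_contains d _ hc, if_pos hc]
  · rw [PySem.Dict.keys_insert_of_not_contains d _ (by simpa using hc), if_neg hc]

theorem pvNodupModify (d : PySem.Dict String (List String)) (p : String)
    (f : List String → List String) (hnd : d.keys.Nodup) : (d.modify p [] f).keys.Nodup := by
  rw [pvKeysModify]
  by_cases hc : d.contains p
  · simpa [hc] using hnd
  · have hpm : p ∉ d.keys := fun hm => hc ((PySem.Dict.contains_iff_mem_keys d p).mpr hm)
    rw [if_neg hc]
    exact List.Nodup.append hnd (List.nodup_singleton p)
      (fun a ha hb => hpm ((List.mem_singleton.mp hb) ▸ ha))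

theorem pvSetdefaultEq (d : PySem.Dict String (List String)) (p : String) (hnd : d.keys.Nodup) :
    d.setdefault p [] = d.modify p [] (fun v => v) := by
  apply pvDictExt
  · rw [PySem.Dict.keys_setdefault, pvKeysModify]
  · rw [PySem.Dict.keys_setdefault]
    by_cases hc : d.contains p
    · simpa [hc] using hnd
    · have hpm : p ∉ d.keys := fun hm => hc ((PySem.Dict.contains_iff_mem_keys d p).mpr hm)
      rw [if_neg hc]
      exact List.Nodup.append hnd (List.nodup_singleton p)
        (fun a ha hb => hpm ((List.mem_singleton.mp hb) ▸ ha))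
  · intro k
    by_cases hkp : k = p
    · subst hkp; rw [PySem.Dict.getD_setdefault_self, PySem.Dict.getD_modify_self]
    · rw [PySem.Dict.getD_eq_get?_getD, PySem.Dict.get?_setdefault_of_ne d _ hkp,
        ← PySem.Dict.getD_eq_get?_getD, PySem.Dict.getD_modify_of_ne d _ _ hkp]

theorem pvModifyModify (d : PySem.Dict String (List String)) (p : String)
    (f g : List String → List String) (hnd : d.keys.Nodup) :
    (d.modify p [] f).modify p [] g = d.modify p [] (fun v => g (f v)) := by
  apply pvDictExt
  · rw [pvKeysModify, pvKeysModify, pvKeysModify, PySem.Dict.contains_modify]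
    simp
  · exact pvNodupModify _ _ _ (pvNodupModify _ _ _ hnd)
  · intro k
    by_cases hkp : k = p
    · subst hkp
      rw [PySem.Dict.getD_modify_self, PySem.Dict.getD_modify_self, PySem.Dict.getD_modify_self]
    · rw [PySem.Dict.getD_modify_of_ne _ _ _ hkp, PySem.Dict.getD_modify_of_ne _ _ _ hkp,
        PySem.Dict.getD_modify_of_ne _ _ _ hkp]

theorem pvFoldModify (us : List String) (p : String) :
    ∀ (f : List String → List String) (d : PySem.Dict String (List String)), d.keys.Nodup →
    us.foldl (fun d u => d.modify p [] (fun v => v ++ [u])) (d.modify p [] f) =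
      d.modify p [] (fun v => f v ++ us) := by
  induction us with
  | nil =>
    intro f d _
    simp
  | cons u us ih =>
    intro f d hnd
    rw [List.foldl_cons, pvModifyModify d p f _ hnd, ih _ d hnd]
    simp

-- A's core step over a header-free segment, with a current block p
theorem pvSegFold (seg : List (List Char)) (hseg : ∀ l ∈ seg, pvIsHeader l = false) :
    ∀ (d : PySem.Dict String (List String)) (p : String),
    seg.foldl pvACore (d, some p) =
      (seg.foldl (fun d u => if PySem.Chars.startswith u "http".toList then
          d.modify p [] (fun v => v ++ [String.ofList u]) else d) d, some p) := by
  induction seg with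
  | nil => intro d p; rfl
  | cons l seg ih =>
    intro d p
    have hl : pvIsHeader l = false := hseg l (by simp)
    have htl : ∀ x ∈ seg, pvIsHeader x = false := fun x hx => hseg x (by simp [hx])
    rw [List.foldl_cons, List.foldl_cons]
    by_cases hh : PySem.Chars.startswith l "http".toList
    · simp only [pvACore, hl, Bool.false_eq_true, if_false, hh, if_true]
      exact ih htl _ p
    · simp only [pvACore, hl, Bool.false_eq_true, if_false, hh, if_false]
      exact ih htl d p

-- a whole segment at once equals B's fill step
theorem pvSegDict (seg : List (List Char)) (hseg : ∀ l ∈ seg, pvIsHeader l = false)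
    (d : PySem.Dict String (List String)) (p : String) (hnd : d.keys.Nodup) :
    seg.foldl pvACore (d.setdefault p [], some p) =
      (d.modify p [] (fun v =>
        v ++ (seg.filter (fun l => PySem.Chars.startswith l "http".toList)).map String.ofList),
       some p) := by
  rw [pvSegFold seg hseg]
  have h1 : seg.foldl (fun d u => if PySem.Chars.startswith u "http".toList then
        d.modify p [] (fun v => v ++ [String.ofList u]) else d) (d.setdefault p []) =
      ((seg.filter (fun l => PySem.Chars.startswith l "http".toList)).map String.ofList).foldl
        (fun d u => d.modify p [] (fun v => v ++ [u])) (d.setdefault p []) := by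
    rw [List.foldl_map, List.foldl_filter]
  rw [h1, pvSetdefaultEq d p hnd, pvFoldModify _ p _ d hnd]

-- main segmentation lemma: on a header-headed list, A's stateful scan equals B's per-segment fold
theorem pvMain : ∀ (ls : List (List Char)),
    (∀ h tl, ls = h :: tl → pvIsHeader h = true) →
    ∀ (d : PySem.Dict String (List String)), d.keys.Nodup →
    ∀ (c : Option String),
    (ls.foldl pvACore (d, c)).1 = (pvBSegs ls).foldl pvBFill d := by
  intro ls
  induction ls using pvBSegs.induct with
  | case1 => intro _ d _ c; simp [pvBSegs]
  | case2 h tl ih =>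
    intro hhead d hnd c
    have hh : pvIsHeader h = true := hhead h tl rfl
    rw [List.foldl_cons]
    have hstep : pvACore (d, c) h = (d.setdefault (pvProto h) [], some (pvProto h)) := by
      simp [pvACore, hh]
    rw [hstep]
    have hsplit : tl = tl.takeWhile (fun l => !pvIsHeader l) ++ tl.dropWhile (fun l => !pvIsHeader l) :=
      (List.takeWhile_append_dropWhile).symm
    conv_lhs => rw [hsplit]
    rw [List.foldl_append]
    have hseg : ∀ l ∈ tl.takeWhile (fun l => !pvIsHeader l), pvIsHeader l = false := by
      intro l hl
      have := List.mem_takeWhile_imp hl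
      simpa using this
    rw [pvSegDict _ hseg d (pvProto h) hnd]
    have hrest : ∀ h' tl', tl.dropWhile (fun l => !pvIsHeader l) = h' :: tl' → pvIsHeader h' = true := by
      intro h' tl' he
      have := pvDropWhileHead _ tl h' tl' he
      simpa using this
    rw [ih hrest _ (pvNodupModify d (pvProto h) _ hnd) (some (pvProto h))]
    simp [pvBSegs, pvBFill]

-- lines before the first header are skipped by A
theorem pvSkip : ∀ (ls : List (List Char)) (d : PySem.Dict String (List String)),
    ls.foldl pvACore (d, none) = (ls.dropWhile (fun l => !pvIsHeader l)).foldl pvACore (d, none) := by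
  intro ls
  induction ls with
  | nil => intro d; rfl
  | cons l tl ih =>
    intro d
    by_cases hh : pvIsHeader l
    · simp [hh]
    · have hstep : pvACore (d, none) l = (d, none) := by simp [pvACore, hh]
      rw [List.dropWhile_cons]
      simp only [hh, Bool.not_false, if_true, List.foldl_cons, hstep]
      exact ih d

-- ===== VERDICT (by name: the statement is the Claim_ definition above) =====
theorem parse_subscriptions_blocks_spec : Claim_equal_parse_subscriptions_blocks := by
  intro s _ _
  unfold Spec_parse_subscriptions_blocks
  unfold parse_subscriptions_blocks parse_subscriptions_blocks_alt pvBLines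
  rw [pvA_fold_norm, pvSkip]
  rw [pvMain _ (fun h tl he => by simpa using pvDropWhileHead _ _ h tl he)
      PySem.Dict.empty (by exact PySem.Dict.nodup_keys_empty) none]
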